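-- pv_equiv track=rewrite | github.com/h2oai/h2ogpt | src/gradio_funcs.py | get_llm_history
-- ===== SOURCE A (Python) =====
-- def get_llm_history(history):
--     # avoid None users used for sources, errors, etc.
--     if history is None:
--         history = []
--     for ii in range(len(history) - 1, -1, -1):
--         if history[ii] and history[ii][0] is not None:
--             last_user_ii = ii
--             history = history[:last_user_ii + 1]
--             break
--     return history
-- ===== SOURCE B (Python) =====
-- def get_llm_history(history):
--     # B: single forward pass tracking the last valid user index, then one slice
--     # (A scans backward from the end and slices at the first hit).
--     if history is None:
--         history = []
--     last = None
--     for ii, entry in enumerate(history):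
--         if entry and entry[0] is not None:
--             last = ii
--     if last is not None:
--         history = history[:last + 1]
--     return history
-- ===== Notes on version B (the rewrite author's own statement) =====
-- stated objective: alternative
-- what changed: Replaces the backward index scan with break-and-slice by a single forward enumerate pass that tracks the last valid user index and slices once after the loop.
import Mathlib
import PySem

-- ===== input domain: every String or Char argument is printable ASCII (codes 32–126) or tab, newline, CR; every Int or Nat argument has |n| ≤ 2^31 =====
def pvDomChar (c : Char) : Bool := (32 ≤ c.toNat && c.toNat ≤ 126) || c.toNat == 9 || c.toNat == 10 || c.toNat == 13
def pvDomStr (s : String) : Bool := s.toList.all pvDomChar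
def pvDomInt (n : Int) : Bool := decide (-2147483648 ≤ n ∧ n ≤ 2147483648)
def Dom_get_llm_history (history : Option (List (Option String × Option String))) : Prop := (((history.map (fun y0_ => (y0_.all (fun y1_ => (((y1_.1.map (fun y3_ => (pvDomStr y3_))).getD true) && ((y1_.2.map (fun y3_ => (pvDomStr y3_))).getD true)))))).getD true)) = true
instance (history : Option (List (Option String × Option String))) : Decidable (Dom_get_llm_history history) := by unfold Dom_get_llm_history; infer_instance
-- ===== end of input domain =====

-- B replaces A's backward index scan (break on first hit, slice there) by one forward
-- enumerate pass tracking the last valid user index, slicing once after the loop (objective: alternative).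


-- ===== PORT A =====
-- the backward for-loop with break; `history[ii]` is a 2-tuple, hence always truthy in
-- Python, so the condition reduces to `history[ii][0] is not None`; indices produced by
-- the range are always in bounds, so pyGetD is exact here.
def pvALoop (h : List (Option String × Option String)) (idxs : List Int) : List (Option String × Option String) :=
  match idxs with
  | [] => h
  | ii :: rest =>
    if (PySem.List.pyGetD h ii (none, none)).1 ≠ none then
      PySem.List.slice h none (some (ii + 1))
    else
      pvALoop h rest

def get_llm_history (history : Option (List (Option String × Option String))) : List (Option String × Option String) :=
  let h := history.getD []
  pvALoop h (PySem.List.pyRange ((h.length : Int) - 1) (-1) (-1))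

-- ===== PORT B =====
def get_llm_history_alt (history : Option (List (Option String × Option String))) : List (Option String × Option String) :=
  let h := history.getD []
  let last := (PySem.List.enumerate h 0).foldl
    (fun (acc : Option Int) (p : Int × (Option String × Option String)) =>
      if p.2.1 ≠ none then some p.1 else acc) none
  match last with
  | some l => PySem.List.slice h none (some (l + 1))
  | none => h

-- ===== PRECONDITION & SPEC =====
def Spec_get_llm_history (history : Option (List (Option String × Option String))) (out : List (Option String × Option String)) : Prop := out = get_llm_history_alt history
instance (history : Option (List (Option String × Option String))) (out : List (Option String × Option String)) : Decidable (Spec_get_llm_history history out) := by unfold Spec_get_llm_history; infer_instance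

-- ===== CLAIM (what is proved, stated in full; the proofs are below) =====
def Claim_equal_get_llm_history : Prop := ∀ (history : Option (List (Option String × Option String))), Dom_get_llm_history history → Spec_get_llm_history history (get_llm_history history)

-- ===== LEMMAS AND PROOFS =====

-- B's loop state after scanning the first m elements
def pvLastOf (h : List (Option String × Option String)) (m : Nat) : Option Int :=
  (PySem.List.enumerate (h.take m) 0).foldl
    (fun (acc : Option Int) (p : Int × (Option String × Option String)) =>
      if p.2.1 ≠ none then some p.1 else acc) none

theorem pv_enumerate_append_singleton {α : Type} (xs : List α) (y : α) (s : Int) :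
    PySem.List.enumerate (xs ++ [y]) s = PySem.List.enumerate xs s ++ [(s + xs.length, y)] := by
  induction xs generalizing s with
  | nil => simp [PySem.List.enumerate_nil, PySem.List.enumerate_cons]
  | cons x t ih =>
      simp [PySem.List.enumerate_cons, ih]
      ring_nf

theorem pvLastOf_succ (h : List (Option String × Option String)) (m : Nat) (hm : m < h.length) :
    pvLastOf h (m + 1) = if (h[m]).1 ≠ none then some (m : Int) else pvLastOf h m := by
  unfold pvLastOf
  rw [List.take_add_one, List.getElem?_eq_getElem hm]
  rw [show (some h[m]).toList = [h[m]] from rfl]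
  rw [pv_enumerate_append_singleton, List.foldl_append]
  simp [min_eq_left (show (m:Int) ≤ (h.length:Int) by exact_mod_cast hm.le)]

theorem pv_key (h : List (Option String × Option String)) (m : Nat) (hm : m ≤ h.length) :
    pvALoop h (PySem.List.pyRange ((m : Int) - 1) (-1) (-1)) =
      (match pvLastOf h m with
       | some l => PySem.List.slice h none (some (l + 1))
       | none => h) := by
  induction m with
  | zero =>
      rw [PySem.List.pyRange_neg_one_eq_nil (by omega)]
      simp [pvALoop, pvLastOf, PySem.List.enumerate_nil]
  | succ m ih =>
      have hm' : m < h.length := by omega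
      have : ((m : Int) + 1) - 1 = (m : Int) := by ring
      rw [show ((m + 1 : Nat) : Int) - 1 = (m : Int) by push_cast; ring]
      rw [PySem.List.pyRange_neg_one_cons (by omega)]
      rw [pvLastOf_succ h m hm']
      unfold pvALoop
      rw [show PySem.List.pyGetD h (m:Int) (none, none) = h[m] by
        simp [PySem.List.pyGetD_natCast, List.getD_eq_getElem?_getD, List.getElem?_eq_getElem hm']]
      by_cases hc : (h[m]).1 ≠ none
      · simp [hc]
      · simp only [hc, ite_false] at *
        simp [ih (by omega)]

-- ===== VERDICT (by name: the statement is the Claim_ definition above) =====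
theorem get_llm_history_spec : Claim_equal_get_llm_history := by
  intro history _
  unfold Spec_get_llm_history get_llm_history get_llm_history_alt
  have hk := pv_key (history.getD []) (history.getD []).length le_rfl
  unfold pvLastOf at hk
  rw [List.take_length] at hk
  exact hk
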